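-- pv_equiv track=rewrite | github.com/16arpi/wikilink | scripts/datasets.py | make_output
-- ===== SOURCE A (Python) =====
-- def make_output(input_ids, offset_mapping, sets):
--     in_sets, _ = sets
--
--     mirror = []
--     last = 0
--     for id, mapping in zip(input_ids, offset_mapping):
--         map_start, map_end = mapping
--
--
--         if map_start == map_end == 0:
--             mirror.append(0)
--             continue
--
--         map_set = set(range(map_start, map_end))
--
--         if map_set.intersection(in_sets):
--             if last == 0:
--                 mirror.append(1)
--                 last = 1
--             else:
--                 mirror.append(2)
--                 last = 2
--         else:
--             mirror.append(0)
--             last = 0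
--
--     return mirror
-- ===== SOURCE B (Python) =====
-- def make_output(input_ids, offset_mapping, sets):
--     in_sets, _ = sets
--     positions = sorted(in_sets)
--
--     def bisect_left(a, x):
--         lo, hi = 0, len(a)
--         while lo < hi:
--             mid = (lo + hi) // 2
--             if a[mid] < x:
--                 lo = mid + 1
--             else:
--                 hi = mid
--         return lo
--
--     # pass 1: per token, None = padding, else whether the span [s, e) contains a link position
--     flags = [None if (s == 0 and e == 0)
--              else bisect_left(positions, s) < bisect_left(positions, e)
--              for _, (s, e) in zip(input_ids, offset_mapping)]
--     # pass 2: turn overlap flags into BIO-like labels (padding does not reset last)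
--     out = []
--     last = 0
--     for f in flags:
--         if f is None:
--             out.append(0)
--         elif f:
--             last = 1 if last == 0 else 2
--             out.append(last)
--         else:
--             last = 0
--             out.append(0)
--     return out
-- ===== Notes on version B (the rewrite author's own statement) =====
-- stated objective: alternative
-- what changed: Splits A's single stateful loop into two staged passes (a map computing per-token overlap flags, then a scan turning flags into BIO labels) and replaces the per-token set(range(s,e)) construction plus set intersection with two binary searches on a once-sorted position list (overlap iff bisect_left(positions,s) < bisect_left(positions,e)).
import Mathlib
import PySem

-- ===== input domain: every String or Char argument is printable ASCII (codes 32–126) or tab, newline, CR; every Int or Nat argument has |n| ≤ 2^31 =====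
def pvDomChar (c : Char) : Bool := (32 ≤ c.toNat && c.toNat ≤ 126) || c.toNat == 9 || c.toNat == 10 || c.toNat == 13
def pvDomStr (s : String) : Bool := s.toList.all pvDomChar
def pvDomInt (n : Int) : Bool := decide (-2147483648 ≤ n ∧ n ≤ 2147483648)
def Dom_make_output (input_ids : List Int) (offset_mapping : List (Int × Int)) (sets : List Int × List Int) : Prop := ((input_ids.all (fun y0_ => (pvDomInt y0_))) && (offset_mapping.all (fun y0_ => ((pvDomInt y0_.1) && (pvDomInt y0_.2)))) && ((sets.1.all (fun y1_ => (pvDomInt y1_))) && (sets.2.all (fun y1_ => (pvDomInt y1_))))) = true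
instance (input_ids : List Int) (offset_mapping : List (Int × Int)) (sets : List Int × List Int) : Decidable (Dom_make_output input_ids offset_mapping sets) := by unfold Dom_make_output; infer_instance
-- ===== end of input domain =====

-- B replaces A's single stateful loop (building set(range(s,e)) and intersecting it with
-- in_sets per token) by two staged passes: a map computing per-token overlap flags via two
-- binary searches on a once-sorted position list, then a scan turning flags into BIO labels.

-- ===== PORT A =====
def stepA (in_sets : List Int) (st : List Int × Int) (p : Int × (Int × Int)) : List Int × Int :=
  let map_start := p.2.1
  let map_end := p.2.2
  if map_start = map_end ∧ map_end = 0 then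
    (st.1 ++ [(0 : Int)], st.2)
  else
    let map_set : PySem.Set Int := PySem.Set.ofList (PySem.List.pyRange map_start map_end 1)
    if PySem.Set.inter map_set in_sets ≠ [] then
      if st.2 = 0 then (st.1 ++ [(1 : Int)], 1) else (st.1 ++ [(2 : Int)], 2)
    else
      (st.1 ++ [(0 : Int)], 0)

def make_output (input_ids : List Int) (offset_mapping : List (Int × Int)) (sets : List Int × List Int) : List Int :=
  (List.foldl (stepA sets.1) ([], 0) (input_ids.zip offset_mapping)).1

-- ===== PORT B =====
-- pass 1 of Source B: None for padding, else bisect_left(positions,s) < bisect_left(positions,e)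
-- (Source B's hand-written bisect_left is the standard bisect_left loop = PySem.List.bisectLeft)
def flagOf (positions : List Int) (m : Int × Int) : Option Bool :=
  if m.1 = 0 ∧ m.2 = 0 then none
  else some (decide (PySem.List.bisectLeft positions m.1 < PySem.List.bisectLeft positions m.2))

-- pass 2 of Source B: the flags → labels scan, carrying 'last' (padding leaves it unchanged)
def labelFlags : Int → List (Option Bool) → List Int
  | _, [] => []
  | last, none :: t => 0 :: labelFlags last t
  | last, some true :: t =>
      let l : Int := if last = 0 then 1 else 2
      l :: labelFlags l t
  | _, some false :: t => 0 :: labelFlags 0 t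

def make_output_alt (input_ids : List Int) (offset_mapping : List (Int × Int)) (sets : List Int × List Int) : List Int :=
  let positions := PySem.List.sorted sets.1 (fun x => x) false
  labelFlags 0 ((input_ids.zip offset_mapping).map (fun p => flagOf positions p.2))

-- ===== PRECONDITION & SPEC =====
def Spec_make_output (input_ids : List Int) (offset_mapping : List (Int × Int)) (sets : List Int × List Int) (out : List Int) : Prop := out = make_output_alt input_ids offset_mapping sets
instance (input_ids : List Int) (offset_mapping : List (Int × Int)) (sets : List Int × List Int) (out : List Int) : Decidable (Spec_make_output input_ids offset_mapping sets out) := by unfold Spec_make_output; infer_instance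

-- ===== CLAIM (what is proved, stated in full; the proofs are below) =====
def Claim_equal_make_output : Prop := ∀ (input_ids : List Int) (offset_mapping : List (Int × Int)) (sets : List Int × List Int), Dom_make_output input_ids offset_mapping sets → Spec_make_output input_ids offset_mapping sets (make_output input_ids offset_mapping sets)

-- ===== LEMMAS AND PROOFS =====
-- bisect_left on the sorted positions finds an element in [s, e) iff one exists
lemma bisect_window (positions : List Int)
    (hsort : positions.Pairwise (· ≤ ·)) (s e : Int) :
    PySem.List.bisectLeft positions s < PySem.List.bisectLeft positions e ↔
      ∃ p ∈ positions, s ≤ p ∧ p < e := by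
  obtain ⟨hsle, hslt, hsge⟩ := PySem.List.bisectLeft_spec positions s hsort
  obtain ⟨hele, helt, hege⟩ := PySem.List.bisectLeft_spec positions e hsort
  constructor
  · intro h
    have hi : PySem.List.bisectLeft positions s < positions.length :=
      lt_of_lt_of_le h hele
    refine ⟨positions[PySem.List.bisectLeft positions s], List.getElem_mem hi, ?_, ?_⟩
    · exact hsge _ hi le_rfl
    · exact helt _ hi h
  · rintro ⟨p, hp, hsp, hpe⟩
    obtain ⟨j, hj, rfl⟩ := List.getElem_of_mem hp
    have h1 : PySem.List.bisectLeft positions s ≤ j := by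
      by_contra hc
      exact absurd (hslt j hj (by omega)) (by omega)
    have h2 : j < PySem.List.bisectLeft positions e := by
      by_contra hc
      exact absurd (hege j hj (by omega)) (by omega)
    omega

-- A's overlap test (nonempty intersection of {s..e-1} with in_sets) equals B's bisect test
lemma inter_ne_iff (in_sets : List Int) (s e : Int) :
    PySem.Set.inter (PySem.Set.ofList (PySem.List.pyRange s e 1)) in_sets ≠ [] ↔
      PySem.List.bisectLeft (PySem.List.sorted in_sets (fun x => x) false) s <
        PySem.List.bisectLeft (PySem.List.sorted in_sets (fun x => x) false) e := by
  rw [bisect_window _ (PySem.List.sorted_pairwise in_sets (fun x => x)),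
    ← List.isEmpty_eq_false_iff, List.isEmpty_eq_false_iff_exists_mem]
  simp only [PySem.Set.mem_inter, PySem.Set.mem_ofList, PySem.List.mem_pyRange_one,
    PySem.List.mem_sorted]
  tauto

-- invariant: A's fold from (acc, last) appends exactly B's labels for the remaining flags
lemma fold_label (in_sets : List Int) (l : List (Int × (Int × Int))) (acc : List Int) (last : Int) :
    (List.foldl (stepA in_sets) (acc, last) l).1 =
      acc ++ labelFlags last
        (l.map (fun p => flagOf (PySem.List.sorted in_sets (fun x => x) false) p.2)) := by
  induction l generalizing acc last with
  | nil => simp [labelFlags]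
  | cons a t ih =>
    simp only [List.foldl_cons, List.map_cons]
    by_cases hpad : a.2.1 = a.2.2 ∧ a.2.2 = 0
    · have hpad' : a.2.1 = 0 ∧ a.2.2 = 0 := ⟨hpad.1.trans hpad.2, hpad.2⟩
      simp [stepA, flagOf, hpad, hpad', labelFlags, ih]
    · have hpad' : ¬ (a.2.1 = 0 ∧ a.2.2 = 0) := by
        intro h; exact hpad ⟨h.1.trans h.2.symm, h.2⟩
      by_cases hov : PySem.List.bisectLeft (PySem.List.sorted in_sets (fun x => x) false) a.2.1 <
          PySem.List.bisectLeft (PySem.List.sorted in_sets (fun x => x) false) a.2.2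
      · have hne := (inter_ne_iff in_sets a.2.1 a.2.2).mpr hov
        by_cases hl : last = 0 <;>
          simp [stepA, flagOf, hpad, hpad', hne, hov, hl, labelFlags, ih]
      · have hne : ¬ PySem.Set.inter (PySem.Set.ofList (PySem.List.pyRange a.2.1 a.2.2 1)) in_sets ≠ [] :=
          fun h => hov ((inter_ne_iff in_sets a.2.1 a.2.2).mp h)
        simp [stepA, flagOf, hpad, hpad', hne, hov, labelFlags, ih]

-- ===== VERDICT (by name: the statement is the Claim_ definition above) =====
theorem make_output_spec : Claim_equal_make_output := by
  intro input_ids offset_mapping sets _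
  unfold Spec_make_output make_output make_output_alt
  rw [fold_label]
  simp
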